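-- pv_equiv track=rewrite | github.com/fdibaldassarre/advent-of-code-2019 | 7/compute2.py | phase_is_valid
-- ===== SOURCE A (Python) =====
-- def phase_is_valid(phase_setting):
--     has_duplicates = False
--     n = len(phase_setting)
--     for i in range(n):
--         for j in range(n):
--             if phase_setting[i] == phase_setting[j] and i != j:
--                 has_duplicates = True
--                 break
--     return not has_duplicates
-- ===== SOURCE B (Python) =====
-- def phase_is_valid(phase_setting):
--     seen = set()
--     for x in phase_setting:
--         if x in seen:
--             return False
--         seen.add(x)
--     return True
-- ===== Notes on version B (the rewrite author's own statement) =====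
-- stated objective: faster
-- what changed: Replaces A's O(n^2) nested pairwise index scan with a single forward pass that maintains a hash set of seen elements and returns False at the first repeat.
import Mathlib
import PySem

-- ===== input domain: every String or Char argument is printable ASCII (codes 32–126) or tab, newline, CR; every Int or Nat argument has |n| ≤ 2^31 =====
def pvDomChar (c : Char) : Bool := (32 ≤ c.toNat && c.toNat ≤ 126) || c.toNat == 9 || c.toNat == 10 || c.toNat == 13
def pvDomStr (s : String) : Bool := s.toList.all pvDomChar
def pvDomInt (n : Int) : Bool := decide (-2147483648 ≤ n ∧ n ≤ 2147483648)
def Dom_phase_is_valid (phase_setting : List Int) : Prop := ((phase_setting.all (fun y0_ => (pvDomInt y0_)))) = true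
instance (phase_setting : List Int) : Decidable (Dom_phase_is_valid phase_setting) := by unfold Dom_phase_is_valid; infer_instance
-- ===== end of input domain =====

-- B replaces A's quadratic nested pairwise index scan by one pass over the list
-- maintaining a set of seen elements with an early False on the first repeat (objective: faster).

-- ===== PORT A =====
-- inner 'for j in range(n)' loop: sets has_duplicates and breaks on the first match
def pvInnerJ (xs : List Int) (i : Int) (has : Bool) : List Int → Bool
  | [] => has
  | j :: js =>
    if PySem.List.pyGet? xs i = PySem.List.pyGet? xs j ∧ i ≠ j then true
    else pvInnerJ xs i has js

def phase_is_valid (phase_setting : List Int) : Bool :=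
  let n : Int := phase_setting.length
  let has_duplicates :=
    (PySem.List.pyRange 0 n 1).foldl
      (fun has i => pvInnerJ phase_setting i has (PySem.List.pyRange 0 n 1)) false
  !has_duplicates

-- ===== PORT B =====
def pvSeenLoop (seen : PySem.Set Int) : List Int → Bool
  | [] => true
  | x :: rest =>
    if PySem.Set.contains seen x then false
    else pvSeenLoop (PySem.Set.add seen x) rest

def phase_is_valid_alt (phase_setting : List Int) : Bool :=
  pvSeenLoop PySem.Set.empty phase_setting

-- ===== PRECONDITION & SPEC =====
def Spec_phase_is_valid (phase_setting : List Int) (out : Bool) : Prop := out = phase_is_valid_alt phase_setting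
instance (phase_setting : List Int) (out : Bool) : Decidable (Spec_phase_is_valid phase_setting out) := by unfold Spec_phase_is_valid; infer_instance

-- ===== CLAIM (what is proved, stated in full; the proofs are below) =====
def Claim_equal_phase_is_valid : Prop := ∀ (phase_setting : List Int), Dom_phase_is_valid phase_setting → Spec_phase_is_valid phase_setting (phase_is_valid phase_setting)

-- ===== LEMMAS AND PROOFS =====

theorem pvInnerJ_eq_any (xs : List Int) (i : Int) :
    ∀ (js : List Int) (has : Bool),
      pvInnerJ xs i has js
        = (has || js.any (fun j => decide (PySem.List.pyGet? xs i = PySem.List.pyGet? xs j ∧ i ≠ j))) := by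
  intro js
  induction js with
  | nil => intro has; simp [pvInnerJ]
  | cons j js ih =>
    intro has
    simp only [pvInnerJ, List.any_cons]
    by_cases h : PySem.List.pyGet? xs i = PySem.List.pyGet? xs j ∧ i ≠ j
    · rw [if_pos h, decide_eq_true h]; simp
    · rw [if_neg h, decide_eq_false h, ih]; simp

theorem pvA_eq_any (xs : List Int) :
    phase_is_valid xs
      = !((PySem.List.pyRange 0 xs.length 1).any (fun i =>
            (PySem.List.pyRange 0 xs.length 1).any (fun j =>
              decide (PySem.List.pyGet? xs i = PySem.List.pyGet? xs j ∧ i ≠ j)))) := by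
  unfold phase_is_valid
  have h : ∀ (l : List Int) (b : Bool),
      l.foldl (fun has i => pvInnerJ xs i has (PySem.List.pyRange 0 xs.length 1)) b
        = (b || l.any (fun i => (PySem.List.pyRange 0 xs.length 1).any (fun j =>
              decide (PySem.List.pyGet? xs i = PySem.List.pyGet? xs j ∧ i ≠ j)))) := by
    intro l
    induction l with
    | nil => intro b; simp
    | cons x xs' ih =>
      intro b
      rw [List.foldl_cons, ih, pvInnerJ_eq_any, List.any_cons]
      simp [Bool.or_assoc]
  simp [h]

theorem pvA_true_iff_nodup (xs : List Int) :
    phase_is_valid xs = true ↔ xs.Nodup := by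
  rw [pvA_eq_any]
  simp only [Bool.not_eq_true', List.any_eq_false, Bool.not_eq_true, decide_eq_true_eq]
  constructor
  · intro h
    rw [List.nodup_iff_injective_get]
    intro a b hab
    have ha := h ((a : Nat) : Int) (by
      rw [PySem.List.mem_pyRange_one]
      exact ⟨Int.natCast_nonneg _, by exact_mod_cast a.isLt⟩)
    have hb := ha ((b : Nat) : Int) (by
      rw [PySem.List.mem_pyRange_one]
      exact ⟨Int.natCast_nonneg _, by exact_mod_cast b.isLt⟩)
    apply Fin.ext
    have : ((a : Nat) : Int) = ((b : Nat) : Int) := by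
      by_contra hne
      apply hb
      refine ⟨?_, hne⟩
      rw [PySem.List.pyGet?_natCast, PySem.List.pyGet?_natCast]
      simp only [List.get_eq_getElem] at hab
      rw [List.getElem?_eq_getElem a.isLt, List.getElem?_eq_getElem b.isLt, hab]
    exact_mod_cast this
  · intro hnd i hi j hj
    rw [PySem.List.mem_pyRange_one] at hi hj
    rintro ⟨heq, hne⟩
    rw [PySem.List.pyGet?_eq_some_getElem xs hi.1 hi.2,
        PySem.List.pyGet?_eq_some_getElem xs hj.1 hj.2] at heq
    have hinj := List.nodup_iff_injective_get.mp hnd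
      (a₁ := ⟨i.toNat, by omega⟩) (a₂ := ⟨j.toNat, by omega⟩)
      (by simp only [List.get_eq_getElem]; simpa using heq)
    have : i.toNat = j.toNat := congrArg Fin.val hinj
    omega

theorem pvSeenLoop_iff (xs : List Int) :
    ∀ (seen : PySem.Set Int),
      pvSeenLoop seen xs = true ↔ (xs.Nodup ∧ ∀ x ∈ xs, x ∉ seen) := by
  induction xs with
  | nil => intro seen; simp [pvSeenLoop]
  | cons x rest ih =>
    intro seen
    simp only [pvSeenLoop]
    by_cases hc : x ∈ seen
    · rw [if_pos (by simpa [PySem.Set.contains] using hc)]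
      simp only [Bool.false_eq_true, false_iff, not_and]
      intro _ hm
      exact hm x (List.mem_cons_self) hc
    · rw [if_neg (by simpa [PySem.Set.contains] using hc)]
      rw [ih]
      constructor
      · rintro ⟨hnd, hmem⟩
        refine ⟨List.nodup_cons.mpr ⟨fun hx => ?_, hnd⟩, ?_⟩
        · exact hmem x hx ((PySem.Set.mem_add seen x x).mpr (Or.inr rfl))
        · intro y hy
          rcases List.mem_cons.mp hy with h | h
          · exact h ▸ hc
          · intro hyseen
            exact hmem y h ((PySem.Set.mem_add seen x y).mpr (Or.inl hyseen))
      · rintro ⟨hnd, hmem⟩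
        rw [List.nodup_cons] at hnd
        refine ⟨hnd.2, fun y hy hyadd => ?_⟩
        rcases (PySem.Set.mem_add seen x y).mp hyadd with h | h
        · exact hmem y (List.mem_cons_of_mem _ hy) h
        · exact hnd.1 (h ▸ hy)

theorem pvB_true_iff_nodup (xs : List Int) :
    phase_is_valid_alt xs = true ↔ xs.Nodup := by
  unfold phase_is_valid_alt
  rw [pvSeenLoop_iff]
  simp [PySem.Set.empty]

-- ===== VERDICT (by name: the statement is the Claim_ definition above) =====
theorem phase_is_valid_spec : Claim_equal_phase_is_valid := by
  intro xs _
  unfold Spec_phase_is_valid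
  rw [Bool.eq_iff_iff, pvA_true_iff_nodup, pvB_true_iff_nodup]
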